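-- pv_equiv track=rewrite | github.com/SamerKharboush/DD | src/ct/knowledge_graph/graphrag_queries.py | find_matching_template
-- ===== SOURCE A (Python) =====
-- from typing import Any, Callable, Optional
--
-- def find_matching_template(query: str) -> Optional[str]:
--     """
--     Find a template that matches a natural language query.
--
--     Simple keyword matching - Phase 2 will add LLM-based matching.
--
--     Args:
--         query: Natural language query
--
--     Returns:
--         Template name or None
--     """
--     query_lower = query.lower()
--
--     # Drug-related queries
--     if any(word in query_lower for word in ["drug", "compound", "inhibitor", "molecule"]):
--         if any(word in query_lower for word in ["target", "bind", "binds"]):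
--             return "drug_targets"
--         if any(word in query_lower for word in ["disease", "treat", "indication"]):
--             return "drug_diseases"
--         if any(word in query_lower for word in ["side effect", "adverse", "toxicity"]):
--             return "drug_side_effects"
--         if any(word in query_lower for word in ["similar", "like"]):
--             return "similar_drugs"
--
--     # Gene/target queries
--     if any(word in query_lower for word in ["gene", "protein", "target"]):
--         if any(word in query_lower for word in ["disease", "associated", "mutation"]):
--             return "gene_diseases"
--         if any(word in query_lower for word in ["pathway", "pathways"]):
--             return "gene_pathways"
--         if any(word in query_lower for word in ["interact", "interacts", "complex"]):
--             return "gene_interactions"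
--         if any(word in query_lower for word in ["drug", "inhibitor", "compound"]):
--             return "gene_drugs"
--
--     # Pathway queries
--     if any(word in query_lower for word in ["pathway", "signaling"]):
--         if any(word in query_lower for word in ["gene", "protein"]):
--             return "pathway_genes"
--         if any(word in query_lower for word in ["drug", "target"]):
--             return "pathway_drugs"
--
--     # Disease queries
--     if any(word in query_lower for word in ["disease", "cancer", "tumor", "indication"]):
--         if any(word in query_lower for word in ["gene", "mutation", "altered"]):
--             return "disease_genes"
--         if any(word in query_lower for word in ["drug", "treatment", "therapy"]):
--             return "disease_drugs"
--
--     # Complex queries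
--     if any(word in query_lower for word in ["resistance", "resistant"]):
--         return "resistance_mechanisms"
--     if any(word in query_lower for word in ["combination", "combine"]):
--         return "combination_targets"
--     if any(word in query_lower for word in ["off-target", "off target"]):
--         return "off_target_path"
--
--     return None
-- ===== SOURCE B (Python) =====
-- # Flattened conjunctive rule base: each route is one rule (list of keyword
-- # groups, all of which must match); B computes ALL firing rules in one
-- # comprehension and returns the first, instead of A's nested if-blocks with
-- # early returns and fall-through (fall-through is emergent: a rule whose inner
-- # group fails simply never fires).
--
-- _RULES = [
--     ([["drug", "compound", "inhibitor", "molecule"], ["target", "bind", "binds"]], "drug_targets"),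
--     ([["drug", "compound", "inhibitor", "molecule"], ["disease", "treat", "indication"]], "drug_diseases"),
--     ([["drug", "compound", "inhibitor", "molecule"], ["side effect", "adverse", "toxicity"]], "drug_side_effects"),
--     ([["drug", "compound", "inhibitor", "molecule"], ["similar", "like"]], "similar_drugs"),
--     ([["gene", "protein", "target"], ["disease", "associated", "mutation"]], "gene_diseases"),
--     ([["gene", "protein", "target"], ["pathway", "pathways"]], "gene_pathways"),
--     ([["gene", "protein", "target"], ["interact", "interacts", "complex"]], "gene_interactions"),
--     ([["gene", "protein", "target"], ["drug", "inhibitor", "compound"]], "gene_drugs"),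
--     ([["pathway", "signaling"], ["gene", "protein"]], "pathway_genes"),
--     ([["pathway", "signaling"], ["drug", "target"]], "pathway_drugs"),
--     ([["disease", "cancer", "tumor", "indication"], ["gene", "mutation", "altered"]], "disease_genes"),
--     ([["disease", "cancer", "tumor", "indication"], ["drug", "treatment", "therapy"]], "disease_drugs"),
--     ([["resistance", "resistant"]], "resistance_mechanisms"),
--     ([["combination", "combine"]], "combination_targets"),
--     ([["off-target", "off target"]], "off_target_path"),
-- ]
--
--
-- def find_matching_template(query: str):
--     ql = query.lower()
--     matches = [t for conds, t in _RULES
--                if all(any(k in ql for k in ks) for ks in conds)]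
--     return matches[0] if matches else None
-- ===== Notes on version B (the rewrite author's own statement) =====
-- stated objective: simpler
-- what changed: Replaced A's nested if-blocks with early returns and fall-through by a flat conjunctive rule base: each route is one rule whose keyword groups must all match, the comprehension collects every firing rule and the first one is returned (fall-through becomes emergent, not control flow).
import Mathlib
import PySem

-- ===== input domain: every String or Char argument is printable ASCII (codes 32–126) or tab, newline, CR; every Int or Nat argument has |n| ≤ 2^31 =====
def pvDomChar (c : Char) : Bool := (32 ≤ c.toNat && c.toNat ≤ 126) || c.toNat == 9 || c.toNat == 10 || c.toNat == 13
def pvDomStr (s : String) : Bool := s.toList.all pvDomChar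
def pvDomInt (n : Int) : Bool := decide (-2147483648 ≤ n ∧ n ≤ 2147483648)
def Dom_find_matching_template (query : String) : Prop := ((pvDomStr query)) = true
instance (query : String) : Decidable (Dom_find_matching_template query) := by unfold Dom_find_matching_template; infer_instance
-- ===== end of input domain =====

-- B flattens A's nested if-blocks into a conjunctive rule base: it collects every
-- firing rule and returns the first (simpler decomposition; same cost).

-- ===== PORT A =====
-- A: chain of keyword checks with early returns; fall-through transliterated
-- as nested lets (each block's "no return" path is the next block).
def find_matching_template (query : String) : Option String :=
  let ql := PySem.Str.lower query
  let hit := fun (ws : List String) => ws.any (fun w => PySem.Str.isIn w ql)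
  let rest4 : Option String :=
    if hit ["resistance", "resistant"] then some "resistance_mechanisms"
    else if hit ["combination", "combine"] then some "combination_targets"
    else if hit ["off-target", "off target"] then some "off_target_path"
    else none
  let rest3 : Option String :=
    if hit ["disease", "cancer", "tumor", "indication"] then
      if hit ["gene", "mutation", "altered"] then some "disease_genes"
      else if hit ["drug", "treatment", "therapy"] then some "disease_drugs"
      else rest4
    else rest4
  let rest2 : Option String :=
    if hit ["pathway", "signaling"] then
      if hit ["gene", "protein"] then some "pathway_genes"
      else if hit ["drug", "target"] then some "pathway_drugs"
      else rest3
    else rest3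
  let rest1 : Option String :=
    if hit ["gene", "protein", "target"] then
      if hit ["disease", "associated", "mutation"] then some "gene_diseases"
      else if hit ["pathway", "pathways"] then some "gene_pathways"
      else if hit ["interact", "interacts", "complex"] then some "gene_interactions"
      else if hit ["drug", "inhibitor", "compound"] then some "gene_drugs"
      else rest2
    else rest2
  if hit ["drug", "compound", "inhibitor", "molecule"] then
    if hit ["target", "bind", "binds"] then some "drug_targets"
    else if hit ["disease", "treat", "indication"] then some "drug_diseases"
    else if hit ["side effect", "adverse", "toxicity"] then some "drug_side_effects"
    else if hit ["similar", "like"] then some "similar_drugs"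
    else rest1
  else rest1

-- ===== PORT B =====
-- B: flat conjunctive rule base; each rule is (keyword groups, template) and fires
-- when every group has a matching keyword; return the first of all firing rules.
def pvRules : List (List (List String) × String) :=
  [ ([["drug", "compound", "inhibitor", "molecule"], ["target", "bind", "binds"]], "drug_targets"),
    ([["drug", "compound", "inhibitor", "molecule"], ["disease", "treat", "indication"]], "drug_diseases"),
    ([["drug", "compound", "inhibitor", "molecule"], ["side effect", "adverse", "toxicity"]], "drug_side_effects"),
    ([["drug", "compound", "inhibitor", "molecule"], ["similar", "like"]], "similar_drugs"),
    ([["gene", "protein", "target"], ["disease", "associated", "mutation"]], "gene_diseases"),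
    ([["gene", "protein", "target"], ["pathway", "pathways"]], "gene_pathways"),
    ([["gene", "protein", "target"], ["interact", "interacts", "complex"]], "gene_interactions"),
    ([["gene", "protein", "target"], ["drug", "inhibitor", "compound"]], "gene_drugs"),
    ([["pathway", "signaling"], ["gene", "protein"]], "pathway_genes"),
    ([["pathway", "signaling"], ["drug", "target"]], "pathway_drugs"),
    ([["disease", "cancer", "tumor", "indication"], ["gene", "mutation", "altered"]], "disease_genes"),
    ([["disease", "cancer", "tumor", "indication"], ["drug", "treatment", "therapy"]], "disease_drugs"),
    ([["resistance", "resistant"]], "resistance_mechanisms"),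
    ([["combination", "combine"]], "combination_targets"),
    ([["off-target", "off target"]], "off_target_path") ]

def find_matching_template_alt (query : String) : Option String :=
  let ql := PySem.Str.lower query
  let hits :=
    (pvRules.filter (fun r => r.1.all (fun ks => ks.any (fun k => PySem.Str.isIn k ql)))).map
      (fun r => r.2)
  match hits with
  | [] => none
  | t :: _ => some t

-- ===== PRECONDITION & SPEC =====
def Spec_find_matching_template (query : String) (out : Option String) : Prop := out = find_matching_template_alt query
instance (query : String) (out : Option String) : Decidable (Spec_find_matching_template query out) := by unfold Spec_find_matching_template; infer_instance

-- ===== CLAIM (what is proved, stated in full; the proofs are below) =====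
def Claim_equal_find_matching_template : Prop := ∀ (query : String), Dom_find_matching_template query → Spec_find_matching_template query (find_matching_template query)

-- ===== LEMMAS AND PROOFS =====

-- "first firing rule" scanner used only to reason about B's filter+map+head.
def pvFirst (p : List (List String) × String → Bool) :
    List (List (List String) × String) → Option String
  | [] => none
  | r :: rest => if p r then some r.2 else pvFirst p rest

theorem pvFirst_eq (p : List (List String) × String → Bool)
    (l : List (List (List String) × String)) :
    (match (l.filter p).map (fun r => r.2) with
      | [] => none
      | t :: _ => some t) = pvFirst p l := by
  induction l with
  | nil => rfl
  | cons r rest ih =>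
    simp only [pvFirst, List.filter]
    cases h : p r <;> simp [ih]

-- Core boolean identity: A's nested blocks equal B's flat first-firing-rule chain,
-- for arbitrary truth values of the 19 keyword-group conditions.
theorem pv_key (o1 o2 o3 o4 o5 o6 o7 a1 a2 a3 a4 b1 b2 b3 b4 c1 c2 d1 d2 : Bool) :
    (let rest4 : Option String :=
        if o5 then some "resistance_mechanisms"
        else if o6 then some "combination_targets"
        else if o7 then some "off_target_path"
        else none
      let rest3 : Option String :=
        if o4 then
          if d1 then some "disease_genes"
          else if d2 then some "disease_drugs"
          else rest4
        else rest4
      let rest2 : Option String :=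
        if o3 then
          if c1 then some "pathway_genes"
          else if c2 then some "pathway_drugs"
          else rest3
        else rest3
      let rest1 : Option String :=
        if o2 then
          if b1 then some "gene_diseases"
          else if b2 then some "gene_pathways"
          else if b3 then some "gene_interactions"
          else if b4 then some "gene_drugs"
          else rest2
        else rest2
      if o1 then
        if a1 then some "drug_targets"
        else if a2 then some "drug_diseases"
        else if a3 then some "drug_side_effects"
        else if a4 then some "similar_drugs"
        else rest1
      else rest1) =
    (if o1 && a1 then some "drug_targets"
      else if o1 && a2 then some "drug_diseases"
      else if o1 && a3 then some "drug_side_effects"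
      else if o1 && a4 then some "similar_drugs"
      else if o2 && b1 then some "gene_diseases"
      else if o2 && b2 then some "gene_pathways"
      else if o2 && b3 then some "gene_interactions"
      else if o2 && b4 then some "gene_drugs"
      else if o3 && c1 then some "pathway_genes"
      else if o3 && c2 then some "pathway_drugs"
      else if o4 && d1 then some "disease_genes"
      else if o4 && d2 then some "disease_drugs"
      else if o5 then some "resistance_mechanisms"
      else if o6 then some "combination_targets"
      else if o7 then some "off_target_path"
      else none) := by
  cases o1 <;> cases o2 <;> cases o3 <;> cases o4 <;> simp

-- ===== VERDICT =====
set_option maxHeartbeats 2000000 in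
theorem find_matching_template_spec : Claim_equal_find_matching_template := by
  intro query _
  unfold Spec_find_matching_template find_matching_template find_matching_template_alt
  rw [pvFirst_eq]
  simp only [pvFirst, pvRules, List.all, Bool.and_true]
  exact pv_key _ _ _ _ _ _ _ _ _ _ _ _ _ _ _ _ _ _ _
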